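-- pv_equiv track=rewrite | github.com/celis-bucket/enrichment-bot | tools/contacts/apollo_enrichment.py | _get_fallback_domains
-- ===== SOURCE A (Python) =====
-- from typing import Dict, Any, List, Optional
--
-- def _get_fallback_domains(domain: str) -> List[str]:
--     """
--     Generate alternate domains to try in Apollo when the primary domain returns nothing.
--
--     Examples:
--         platanomelon.mx      → [platanomelon.com]
--         gaiadesign.com.mx    → [gaiadesign.com]
--         onehalf.com.co       → [onehalf.com]
--         armatura.com.co      → [armatura.com]
--         example.com          → []  (already .com, no fallback)
--     """
--     compound_tlds = ['.com.mx', '.com.co', '.com.ar', '.com.br', '.com.pe', '.com.ec']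
--     country_tlds = ['.mx', '.co', '.ar', '.cl', '.pe', '.ec', '.br']
--
--     for ctld in compound_tlds:
--         if domain.endswith(ctld):
--             base = domain[:-len(ctld)]
--             return [f"{base}.com"]
--
--     for ctld in country_tlds:
--         if domain.endswith(ctld):
--             base = domain[:-len(ctld)]
--             return [f"{base}.com"]
--
--     return []
-- ===== SOURCE B (Python) =====
-- from typing import List
--
-- def _get_fallback_domains(domain: str) -> List[str]:
--     parts = domain.split('.')
--     if len(parts) >= 3 and parts[-2] == 'com' and parts[-1] in ('mx', 'co', 'ar', 'br', 'pe', 'ec'):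
--         return ['.'.join(parts[:-2]) + '.com']
--     if len(parts) >= 2 and parts[-1] in ('mx', 'co', 'ar', 'cl', 'pe', 'ec', 'br'):
--         return ['.'.join(parts[:-1]) + '.com']
--     return []
-- ===== Notes on version B (the rewrite author's own statement) =====
-- stated objective: idiomatic
-- what changed: B splits the domain once into dot-separated labels and decides on the last one or two labels, instead of A's ordered endswith scans over two hard-coded suffix-string lists.
import Mathlib
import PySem

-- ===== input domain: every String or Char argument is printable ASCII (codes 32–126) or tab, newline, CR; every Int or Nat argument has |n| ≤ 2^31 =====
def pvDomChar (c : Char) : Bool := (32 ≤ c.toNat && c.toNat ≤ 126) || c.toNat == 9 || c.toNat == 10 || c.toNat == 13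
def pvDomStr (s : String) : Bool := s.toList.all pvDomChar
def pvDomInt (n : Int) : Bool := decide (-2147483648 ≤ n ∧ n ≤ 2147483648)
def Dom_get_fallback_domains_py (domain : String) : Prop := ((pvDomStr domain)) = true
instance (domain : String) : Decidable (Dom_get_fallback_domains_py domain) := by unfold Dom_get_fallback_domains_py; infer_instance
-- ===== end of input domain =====

-- B replaces A's ordered suffix scans over two TLD string lists by splitting the domain once
-- into dot-separated labels and deciding on the last one or two labels (idiomatic; same cost).

-- ===== PORT A =====
-- the loop "for ctld in tlds: if domain.endswith(ctld): return [domain[:-len(ctld)] + '.com']"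
def pvTryTlds (tlds : List (List Char)) (l : List Char) : Option (List Char) :=
  match tlds with
  | [] => none
  | t :: ts =>
    if PySem.Chars.endswith l t then
      some (PySem.Chars.slice l none (some (-(t.length : Int))) ++ ['.', 'c', 'o', 'm'])
    else pvTryTlds ts l

def pvCompoundTlds : List (List Char) :=
  [['.','c','o','m','.','m','x'], ['.','c','o','m','.','c','o'], ['.','c','o','m','.','a','r'],
   ['.','c','o','m','.','b','r'], ['.','c','o','m','.','p','e'], ['.','c','o','m','.','e','c']]

def pvCountryTlds : List (List Char) :=
  [['.','m','x'], ['.','c','o'], ['.','a','r'], ['.','c','l'], ['.','p','e'], ['.','e','c'], ['.','b','r']]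

def get_fallback_domains_py (domain : String) : List String :=
  match pvTryTlds pvCompoundTlds domain.toList with
  | some b => [String.ofList b]
  | none =>
    match pvTryTlds pvCountryTlds domain.toList with
    | some b => [String.ofList b]
    | none => []

-- ===== PORT B =====
def pvCompoundCtrys : List (List Char) :=
  [['m','x'], ['c','o'], ['a','r'], ['b','r'], ['p','e'], ['e','c']]

def pvCountryCtrys : List (List Char) :=
  [['m','x'], ['c','o'], ['a','r'], ['c','l'], ['p','e'], ['e','c'], ['b','r']]

def pvBChars (l : List Char) : List (List Char) :=
  let parts := l.splitOn '.'
  if 3 ≤ parts.length ∧ PySem.List.pyGet? parts (-2) = some ['c','o','m'] ∧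
      (∃ t ∈ pvCompoundCtrys, PySem.List.pyGet? parts (-1) = some t) then
    [PySem.Chars.join ['.'] (PySem.List.slice parts none (some (-2))) ++ ['.', 'c', 'o', 'm']]
  else if 2 ≤ parts.length ∧ (∃ t ∈ pvCountryCtrys, PySem.List.pyGet? parts (-1) = some t) then
    [PySem.Chars.join ['.'] (PySem.List.slice parts none (some (-1))) ++ ['.', 'c', 'o', 'm']]
  else []

def get_fallback_domains_py_alt (domain : String) : List String :=
  (pvBChars domain.toList).map String.ofList

-- ===== PRECONDITION & SPEC =====
def Spec_get_fallback_domains_py (domain : String) (out : List String) : Prop := out = get_fallback_domains_py_alt domain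
instance (domain : String) (out : List String) : Decidable (Spec_get_fallback_domains_py domain out) := by unfold Spec_get_fallback_domains_py; infer_instance

-- ===== CLAIM (what is proved, stated in full; the proofs are below) =====
def Claim_equal_get_fallback_domains_py : Prop := ∀ (domain : String), Dom_get_fallback_domains_py domain → Spec_get_fallback_domains_py domain (get_fallback_domains_py domain)

-- ===== LEMMAS AND PROOFS =====

theorem pv_nodot_of_mem_splitOn : ∀ {l p : List Char}, p ∈ l.splitOn '.' → '.' ∉ p := by
  intro l
  induction l with
  | nil => intro p hp; simp [List.splitOn, List.splitOnP_nil] at hp; simp [hp]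
  | cons c l ih =>
    intro p hp
    simp only [List.splitOn, List.splitOnP_cons] at hp
    by_cases hc : c = '.'
    · simp [hc] at hp
      rcases hp with hp | hp
      · simp [hp]
      · exact ih hp
    · rw [if_neg (by simp [hc])] at hp
      rcases hsp : List.splitOnP (fun x => x == '.') l with _ | ⟨q, qs⟩
      · exact absurd hsp (List.splitOnP_ne_nil _ l)
      · rw [hsp] at hp
        have hq : q ∈ l.splitOn '.' := by rw [List.splitOn, hsp]; exact List.mem_cons_self
        simp only [List.modifyHead_cons, List.mem_cons] at hp
        rcases hp with hp | hp
        · subst hp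
          intro hm
          rcases List.mem_cons.mp hm with h | h
          · exact hc h.symm
          · exact ih hq h
        · exact ih (by rw [List.splitOn, hsp]; exact List.mem_cons_of_mem _ hp)

theorem pv_intercalate_cons₂ (q q' : List Char) (qs : List (List Char)) :
    ['.'].intercalate (q :: q' :: qs) = q ++ '.' :: ['.'].intercalate (q' :: qs) := by
  simp [List.intercalate]

theorem pv_intercalate_concat (ps : List (List Char)) (hps : ps ≠ []) (t : List Char) :
    ['.'].intercalate (ps ++ [t]) = ['.'].intercalate ps ++ '.' :: t := by
  induction ps with
  | nil => exact absurd rfl hps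
  | cons q qs ih =>
    rcases qs with _ | ⟨q', qs'⟩
    · simp [List.intercalate]
    · rw [show (q :: q' :: qs') ++ [t] = q :: (q' :: (qs' ++ [t])) by simp,
        pv_intercalate_cons₂, show q' :: (qs' ++ [t]) = (q' :: qs') ++ [t] by simp,
        ih (by simp), pv_intercalate_cons₂]
      simp

theorem pv_suffix_unique {m t s : List Char} (ht : '.' ∉ t) (hs : '.' ∉ s) :
    ('.' :: s) <:+ (m ++ '.' :: t) ↔ s = t := by
  constructor
  · intro h
    have h1 : ('.' :: t) <:+ (m ++ '.' :: t) := List.suffix_append m _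
    rcases List.suffix_or_suffix_of_suffix h h1 with h2 | h2
    · rcases List.suffix_cons_iff.mp h2 with h3 | h3
      · injection h3
      · exact absurd (h3.subset List.mem_cons_self) ht
    · rcases List.suffix_cons_iff.mp h2 with h3 | h3
      · injection h3 with _ h4; exact h4.symm
      · exact absurd (h3.subset List.mem_cons_self) hs
  · rintro rfl
    exact List.suffix_append m _

theorem pv_suffix_compound {m t s : List Char} (ht : '.' ∉ t) (hs : '.' ∉ s) :
    ('.' :: 'c' :: 'o' :: 'm' :: '.' :: s) <:+ (m ++ '.' :: t) ↔
      s = t ∧ ['.', 'c', 'o', 'm'] <:+ m := by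
  constructor
  · intro h
    have hst : s = t := by
      have h0 : ('.' :: s) <:+ ('.' :: 'c' :: 'o' :: 'm' :: '.' :: s) :=
        ⟨['.', 'c', 'o', 'm'], rfl⟩
      exact (pv_suffix_unique ht hs).mp (h0.trans h)
    subst hst
    obtain ⟨b, hb⟩ := h
    have hb' : (b ++ ['.', 'c', 'o', 'm']) ++ '.' :: s = m ++ '.' :: s := by
      simpa using hb
    have hm : m = b ++ ['.', 'c', 'o', 'm'] := (List.append_cancel_right hb').symm
    exact ⟨rfl, hm ▸ List.suffix_append b _⟩
  · rintro ⟨rfl, b, hb⟩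
    refine ⟨b, ?_⟩
    rw [← hb]
    simp

theorem pv_slice_len {b s : List Char} {k : Int} (hk : (s.length : Int) = k) (h0 : s ≠ []) :
    PySem.Chars.slice (b ++ s) none (some (-k)) = b := by
  subst hk
  have h0 : 0 < s.length := List.length_pos_iff.mpr h0
  simp only [PySem.Chars.slice_eq_listSlice]
  simp only [PySem.List.slice, PySem.List.clampIdx, List.length_append]
  rw [if_pos (by omega : -(s.length : Int) < 0)]
  rw [if_neg (by push_cast; omega : ¬ ((((b.length + s.length : Nat)) : Int) + -(s.length : Int) < 0))]
  rw [show ((((b.length + s.length : Nat)) : Int) + -(s.length : Int)).toNat = b.length by push_cast; omega]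
  simp [List.take_left']

theorem pv_slice_len' {α : Type} {b s : List α} {k : Int} (hk : (s.length : Int) = k) (h0 : s ≠ []) :
    PySem.List.slice (b ++ s) none (some (-k)) = b := by
  subst hk
  have h0 : 0 < s.length := List.length_pos_iff.mpr h0
  simp only [PySem.List.slice, PySem.List.clampIdx, List.length_append]
  rw [if_pos (by omega : -(s.length : Int) < 0)]
  rw [if_neg (by push_cast; omega : ¬ ((((b.length + s.length : Nat)) : Int) + -(s.length : Int) < 0))]
  rw [show ((((b.length + s.length : Nat)) : Int) + -(s.length : Int)).toNat = b.length by push_cast; omega]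
  simp [List.take_left']

theorem pv_pyGet_last {α : Type} (ps : List α) (t : α) :
    PySem.List.pyGet? (ps ++ [t]) (-1) = some t := by
  simp only [PySem.List.pyGet?, PySem.List.pyIdx?, List.length_append, List.length_cons,
    List.length_nil]
  rw [if_neg (by omega), if_pos (by push_cast; omega)]
  simp only [Option.bind_some]
  rw [show ps.length + (0 + 1) - (-(-1:Int)).toNat = ps.length by omega]
  simp

theorem pv_pyGet_two {α : Type} (qs : List α) (c t : α) :
    PySem.List.pyGet? (qs ++ [c, t]) (-2) = some c := by
  simp only [PySem.List.pyGet?, PySem.List.pyIdx?, List.length_append, List.length_cons,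
    List.length_nil]
  rw [if_neg (by omega), if_pos (by push_cast; omega)]
  simp only [Option.bind_some]
  rw [show qs.length + (0 + 1 + 1) - (-(-2:Int)).toNat = qs.length by omega]
  simp

theorem pv_tryTlds_none {tlds : List (List Char)} {l : List Char}
    (h : '.' ∉ l) (hd : ∀ p ∈ tlds, '.' ∈ p) : pvTryTlds tlds l = none := by
  induction tlds with
  | nil => rfl
  | cons t ts ih =>
    unfold pvTryTlds
    rw [if_neg, ih (fun p hp => hd p (List.mem_cons_of_mem _ hp))]
    intro hew
    exact h ((PySem.Chars.endswith_iff l t |>.mp hew).subset (hd t List.mem_cons_self))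

theorem pv_main (l : List Char) :
    (match pvTryTlds pvCompoundTlds l with
     | some b => [b]
     | none => match pvTryTlds pvCountryTlds l with
       | some b => [b]
       | none => []) = pvBChars l := by
  rcases List.eq_nil_or_concat (l.splitOn '.') with hnil | ⟨ps, t, hps⟩
  · exact absurd hnil (List.splitOnP_ne_nil _ l)
  · rw [List.concat_eq_append] at hps
    have ht : '.' ∉ t := pv_nodot_of_mem_splitOn (by rw [hps]; simp)
    rcases List.eq_nil_or_concat ps with rfl | ⟨qs, c, hqc⟩
    · -- l has no dot: l = t
      have hl : l = t := by
        have := List.intercalate_splitOn l '.'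
        rw [hps] at this
        simpa [List.intercalate] using this.symm
      have hnd : '.' ∉ l := hl ▸ ht
      rw [pv_tryTlds_none hnd (by decide), pv_tryTlds_none hnd (by decide)]
      simp [pvBChars, hps]
    · rw [List.concat_eq_append] at hqc
      subst hqc
      have hc : '.' ∉ c := pv_nodot_of_mem_splitOn (by rw [hps]; simp)
      have hm : l = ['.'].intercalate (qs ++ [c]) ++ '.' :: t := by
        have := List.intercalate_splitOn l '.'
        rw [hps, pv_intercalate_concat _ (by simp) t] at this
        exact this.symm
      have hew : ∀ s : List Char, '.' ∉ s →
          (PySem.Chars.endswith l ('.' :: s) = true ↔ s = t) := by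
        intro s hs
        rw [PySem.Chars.endswith_iff, hm]
        exact pv_suffix_unique ht hs
      have hcomdot : (['.', 'c', 'o', 'm'] <:+ ['.'].intercalate (qs ++ [c])) ↔
          (qs ≠ [] ∧ c = ['c', 'o', 'm']) := by
        rcases qs with _ | ⟨q, qs'⟩
        · simp only [List.nil_append]
          constructor
          · intro h
            exact absurd (h.subset (by simp : ('.' : Char) ∈ (['.', 'c', 'o', 'm'] : List Char)))
              (by simpa [List.intercalate] using hc)
          · rintro ⟨h, -⟩; exact absurd rfl h
        · rw [pv_intercalate_concat _ (by simp) c]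
          rw [show (['.', 'c', 'o', 'm'] : List Char) = '.' :: ['c', 'o', 'm'] from rfl]
          rw [pv_suffix_unique hc (by decide)]
          simp [eq_comm]
      have hewc : ∀ s : List Char, '.' ∉ s →
          (PySem.Chars.endswith l ('.' :: 'c' :: 'o' :: 'm' :: '.' :: s) = true ↔
            s = t ∧ qs ≠ [] ∧ c = ['c', 'o', 'm']) := by
        intro s hs
        rw [PySem.Chars.endswith_iff, hm, pv_suffix_compound ht hs, hcomdot]
      have hlen : (l.splitOn '.').length = qs.length + 2 := by rw [hps]; simp
      have hg1 : PySem.List.pyGet? (l.splitOn '.') (-1) = some t := by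
        rw [hps]; exact pv_pyGet_last _ t
      have hg2 : PySem.List.pyGet? (l.splitOn '.') (-2) = some c := by
        rw [hps, show qs ++ [c] ++ [t] = qs ++ [c, t] by simp]; exact pv_pyGet_two qs c t
      have hsl1 : PySem.List.slice (l.splitOn '.') none (some (-1)) = qs ++ [c] := by
        rw [hps]; exact pv_slice_len' (by norm_num) (by simp)
      have hsl2 : PySem.List.slice (l.splitOn '.') none (some (-2)) = qs := by
        rw [hps, show qs ++ [c] ++ [t] = qs ++ [c, t] by simp]
        exact pv_slice_len' (by norm_num) (by simp)
      have hA3 : t.length = 2 →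
          PySem.Chars.slice l none (some (-3)) = ['.'].intercalate (qs ++ [c]) := by
        intro h2
        rw [hm]
        exact pv_slice_len (by simp [h2]) (by simp)
      have hA7 : qs ≠ [] → c = ['c', 'o', 'm'] → t.length = 2 →
          PySem.Chars.slice l none (some (-7)) = ['.'].intercalate qs := by
        intro hq hcc h2
        rw [hm, pv_intercalate_concat qs hq, hcc,
          show (['.'].intercalate qs ++ '.' :: ['c', 'o', 'm']) ++ '.' :: t
            = ['.'].intercalate qs ++ (['.', 'c', 'o', 'm', '.'] ++ t) by simp]
        exact pv_slice_len (by simp [h2]) (by simp)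
      -- B's two guards, as conditions on qs, c, t
      have hBcomp : (3 ≤ (l.splitOn '.').length ∧
          PySem.List.pyGet? (l.splitOn '.') (-2) = some ['c', 'o', 'm'] ∧
          (∃ t' ∈ pvCompoundCtrys, PySem.List.pyGet? (l.splitOn '.') (-1) = some t')) ↔
          (qs ≠ [] ∧ c = ['c', 'o', 'm'] ∧ t ∈ pvCompoundCtrys) := by
        rw [hlen, hg2]
        simp only [hg1, Option.some.injEq]
        constructor
        · rintro ⟨h3, hcq, t', ht', he⟩
          exact ⟨by rintro rfl; simp at h3, hcq, he ▸ ht'⟩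
        · rintro ⟨hq, hcq, hmem⟩
          have : 1 ≤ qs.length := List.length_pos_iff.mpr hq
          exact ⟨by omega, hcq, t, hmem, rfl⟩
      have hBctry : (2 ≤ (l.splitOn '.').length ∧
          (∃ t' ∈ pvCountryCtrys, PySem.List.pyGet? (l.splitOn '.') (-1) = some t')) ↔
          t ∈ pvCountryCtrys := by
        rw [hlen]
        simp only [hg1, Option.some.injEq]
        constructor
        · rintro ⟨-, t', ht', he⟩
          exact he ▸ ht'
        · intro hmem
          exact ⟨by omega, t, hmem, rfl⟩
      -- A's two scans, evaluated
      have hAcomp : pvTryTlds pvCompoundTlds l =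
          (if qs ≠ [] ∧ c = ['c', 'o', 'm'] ∧ t ∈ pvCompoundCtrys then
            some (['.'].intercalate qs ++ ['.', 'c', 'o', 'm']) else none) := by
        simp only [pvCompoundTlds, pvTryTlds]
        simp only [hewc ['m','x'] (by decide), hewc ['c','o'] (by decide),
          hewc ['a','r'] (by decide), hewc ['b','r'] (by decide),
          hewc ['p','e'] (by decide), hewc ['e','c'] (by decide)]
        by_cases hmem : t ∈ pvCompoundCtrys
        · simp only [pvCompoundCtrys, List.mem_cons, List.not_mem_nil, or_false] at hmem
          rcases hmem with rfl | rfl | rfl | rfl | rfl | rfl <;>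
            by_cases hq : qs = [] <;> by_cases hcc : c = ['c', 'o', 'm'] <;>
              simp_all [pvCompoundCtrys]
        · have h1 : (['m','x'] : List Char) ≠ t := fun h => hmem (by rw [← h]; simp [pvCompoundCtrys])
          have h2 : (['c','o'] : List Char) ≠ t := fun h => hmem (by rw [← h]; simp [pvCompoundCtrys])
          have h3 : (['a','r'] : List Char) ≠ t := fun h => hmem (by rw [← h]; simp [pvCompoundCtrys])
          have h4 : (['b','r'] : List Char) ≠ t := fun h => hmem (by rw [← h]; simp [pvCompoundCtrys])
          have h5 : (['p','e'] : List Char) ≠ t := fun h => hmem (by rw [← h]; simp [pvCompoundCtrys])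
          have h6 : (['e','c'] : List Char) ≠ t := fun h => hmem (by rw [← h]; simp [pvCompoundCtrys])
          simp [h1, h2, h3, h4, h5, h6, hmem]
      have hActry : pvTryTlds pvCountryTlds l =
          (if t ∈ pvCountryCtrys then
            some (['.'].intercalate (qs ++ [c]) ++ ['.', 'c', 'o', 'm']) else none) := by
        simp only [pvCountryTlds, pvTryTlds]
        simp only [hew ['m','x'] (by decide), hew ['c','o'] (by decide),
          hew ['a','r'] (by decide), hew ['c','l'] (by decide),
          hew ['p','e'] (by decide), hew ['e','c'] (by decide), hew ['b','r'] (by decide)]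
        by_cases hmem : t ∈ pvCountryCtrys
        · simp only [pvCountryCtrys, List.mem_cons, List.not_mem_nil, or_false] at hmem
          rcases hmem with rfl | rfl | rfl | rfl | rfl | rfl | rfl <;>
            simp_all [pvCountryCtrys]
        · have h1 : (['m','x'] : List Char) ≠ t := fun h => hmem (by rw [← h]; simp [pvCountryCtrys])
          have h2 : (['c','o'] : List Char) ≠ t := fun h => hmem (by rw [← h]; simp [pvCountryCtrys])
          have h3 : (['a','r'] : List Char) ≠ t := fun h => hmem (by rw [← h]; simp [pvCountryCtrys])
          have h4 : (['c','l'] : List Char) ≠ t := fun h => hmem (by rw [← h]; simp [pvCountryCtrys])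
          have h5 : (['p','e'] : List Char) ≠ t := fun h => hmem (by rw [← h]; simp [pvCountryCtrys])
          have h6 : (['e','c'] : List Char) ≠ t := fun h => hmem (by rw [← h]; simp [pvCountryCtrys])
          have h7 : (['b','r'] : List Char) ≠ t := fun h => hmem (by rw [← h]; simp [pvCountryCtrys])
          simp [h1, h2, h3, h4, h5, h6, h7, hmem]
      -- put the two sides together
      rw [hAcomp, hActry]
      unfold pvBChars
      by_cases hC : qs ≠ [] ∧ c = ['c', 'o', 'm'] ∧ t ∈ pvCompoundCtrys
      · rw [if_pos hC, if_pos (hBcomp.mpr hC)]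
        rw [hsl2]
        rfl
      · rw [if_neg hC, if_neg (fun h => hC (hBcomp.mp h))]
        by_cases hT : t ∈ pvCountryCtrys
        · rw [if_pos hT, if_pos (hBctry.mpr hT)]
          rw [hsl1]
          rfl
        · rw [if_neg hT, if_neg (fun h => hT (hBctry.mp h))]

-- ===== VERDICT (by name: the statement is the Claim_ definition above) =====
theorem get_fallback_domains_py_spec : Claim_equal_get_fallback_domains_py := by
  intro domain _
  unfold Spec_get_fallback_domains_py get_fallback_domains_py get_fallback_domains_py_alt
  rw [← pv_main domain.toList]
  rcases pvTryTlds pvCompoundTlds domain.toList with _ | b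
  · rcases pvTryTlds pvCountryTlds domain.toList with _ | b <;> simp
  · simp
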